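-- pv_equiv track=rewrite | github.com/1iis/m01 | books/update_readme.py | parse_existing_table
-- ===== SOURCE A (Python) =====
-- from collections import OrderedDict
--
-- TABLE_HEADER = "| Title | Chars | Words | Tokens<br>(Qwen3) |"
--
-- def parse_existing_table(content: str):
--     """Returns (before_table_lines, existing_data_dict, after_table_lines)"""
--     lines = content.splitlines()
--     table_start = -1
--
--     for i, line in enumerate(lines):
--         if TABLE_HEADER.strip() in line:
--             table_start = i
--             break
--
--     if table_start == -1:
--         # No table yet → whole file is "before"
--         return lines, OrderedDict(), []
--
--     # Find end of table
--     table_end = len(lines)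
--     for i in range(table_start + 2, len(lines)):
--         if not lines[i].strip().startswith("|"):
--             table_end = i
--             break
--
--     before = lines[:table_start]
--     table_section = lines[table_start:table_end]
--     after = lines[table_end:]
--
--     # Parse existing rows
--     data = OrderedDict()
--     for line in table_section[2:]:  # skip header + separator
--         if not line.strip() or not line.startswith("|"):
--             continue
--         parts = [p.strip() for p in line.split("|") if p.strip()]
--         if len(parts) >= 3:
--             title = parts[0]
--             data[title] = {
--                 "chars": parts[1],
--                 "words": parts[2],
--                 "tokens": parts[3] if len(parts) > 3 else ""
--             }
--
--     return before + table_section[:2], data, after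
-- ===== SOURCE B (Python) =====
-- from collections import OrderedDict
--
-- TABLE_HEADER = "| Title | Chars | Words | Tokens<br>(Qwen3) |"
--
-- def parse_existing_table(content: str):
--     """Returns (before_table_lines, existing_data_dict, after_table_lines)"""
--     lines = content.splitlines()
--     before, header_keep, after = [], [], []
--     data = OrderedDict()
--     phase = 0        # 0 = before the table, 1 = inside the table, 2 = after it
--     seen = 0         # table lines seen so far (header counts as 1)
--     for line in lines:
--         if phase == 0:
--             if TABLE_HEADER.strip() in line:
--                 phase, seen = 1, 1
--                 header_keep.append(line)
--             else:
--                 before.append(line)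
--         elif phase == 1:
--             seen += 1
--             if seen == 2:
--                 header_keep.append(line)   # separator row, kept unparsed
--             elif not line.strip().startswith("|"):
--                 phase = 2
--                 after.append(line)
--             else:
--                 if line.strip() and line.startswith("|"):
--                     parts = [p.strip() for p in line.split("|") if p.strip()]
--                     if len(parts) >= 3:
--                         data[parts[0]] = {
--                             "chars": parts[1],
--                             "words": parts[2],
--                             "tokens": parts[3] if len(parts) > 3 else ""
--                         }
--         else:
--             after.append(line)
--     if phase == 0:
--         return lines, OrderedDict(), []
--     return before + header_keep, data, after
-- ===== Notes on version B (the rewrite author's own statement) =====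
-- stated objective: alternative
-- what changed: A finds the header index, re-scans an index range for the table end and cuts three slices plus a row loop; B makes one linear phase-driven pass (before -> table -> after) over the lines, building all three parts and the OrderedDict as it goes.
import Mathlib
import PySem

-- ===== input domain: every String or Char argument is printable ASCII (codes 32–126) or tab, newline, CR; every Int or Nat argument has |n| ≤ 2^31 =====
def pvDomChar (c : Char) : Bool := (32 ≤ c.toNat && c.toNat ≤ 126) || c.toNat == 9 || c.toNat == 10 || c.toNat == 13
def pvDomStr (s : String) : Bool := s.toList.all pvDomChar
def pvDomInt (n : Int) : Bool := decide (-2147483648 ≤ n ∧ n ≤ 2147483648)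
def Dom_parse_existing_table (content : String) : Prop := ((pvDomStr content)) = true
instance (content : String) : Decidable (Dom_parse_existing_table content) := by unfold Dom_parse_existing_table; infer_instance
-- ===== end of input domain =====

-- B replaces A's index search + range scan + three slices by one linear phase-driven pass
-- ('before' → 'table' → 'after') over the lines; same return value, different decomposition.

-- ===== PORT A =====
def pvTableHeader : String := "| Title | Chars | Words | Tokens<br>(Qwen3) |"

-- 'for i, line in enumerate(lines): if TABLE_HEADER.strip() in line: table_start = i; break'
-- (the -1 sentinel + break ported as the standard Option-returning first-index recursion)
def pvFindStartA : List String → Nat → Option Nat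
  | [], _ => none
  | l :: ls, i =>
    if PySem.Str.isIn (PySem.Str.strip pvTableHeader) l then some i else pvFindStartA ls (i + 1)

-- 'for i in range(table_start + 2, len(lines)): if not lines[i].strip().startswith("|"): table_end = i; break'
-- (index loop, default result len(lines); lines[i] is always in range, read via getElem under the bound)
def pvFindEndA (lines : List String) (i : Nat) : Nat :=
  if h : i < lines.length then
    if PySem.Str.startswith (PySem.Str.strip lines[i]) "|" = false then i
    else pvFindEndA lines (i + 1)
  else lines.length
termination_by lines.length - i
decreasing_by omega

-- 'if len(parts) >= 3: data[title] = {...}' (shared literal dict layout of the row value)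
def pvInsertRow (d : PySem.Dict String (List (String × String))) (parts : List String) :
    PySem.Dict String (List (String × String)) :=
  if parts.length ≥ 3 then
    d.insert (parts.getD 0 "")
      [("chars", parts.getD 1 ""), ("words", parts.getD 2 ""),
       ("tokens", if parts.length > 3 then parts.getD 3 "" else "")]
  else d

-- the body of A's row loop: skip-filter + split('|') + OrderedDict insert
-- (line.split("|") with nonempty separator never raises: .getD [] is exact)
def pvRowStepA (d : PySem.Dict String (List (String × String))) (line : String) :
    PySem.Dict String (List (String × String)) :=
  if PySem.Str.strip line == "" || !(PySem.Str.startswith line "|") then d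
  else
    pvInsertRow d (((PySem.Str.split? line "|").getD []).filter
        (fun p => PySem.Str.strip p ≠ "") |>.map PySem.Str.strip)

-- 'before + table_section[:2], data, after' assembled from the two indices, as A slices them
def pvAssembleA (lines : List String) (ts te : Nat) :
    List String × (List (String × List (String × String))) × List String :=
  (PySem.List.slice lines none (some (ts : Int)) ++
     PySem.List.slice (PySem.List.slice lines (some (ts : Int)) (some (te : Int))) none (some 2),
   ((PySem.List.slice (PySem.List.slice lines (some (ts : Int)) (some (te : Int))) (some 2) none).foldl
       pvRowStepA PySem.Dict.empty).items,
   PySem.List.slice lines (some (te : Int)) none)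

def pvParseA (lines : List String) :
    List String × (List (String × List (String × String))) × List String :=
  match pvFindStartA lines 0 with
  | none => (lines, (PySem.Dict.empty : PySem.Dict String (List (String × String))).items, [])
  | some ts => pvAssembleA lines ts (pvFindEndA lines (ts + 2))

def parse_existing_table (content : String) :
    List String × (List (String × List (String × String))) × List String :=
  pvParseA (PySem.Str.splitlines content)

-- ===== PORT B =====
-- phase 0 of Source B's loop: accumulate 'before' until the header line is hit
def pvGoBeforeB : List String → Option (List String × String × List String)
  | [] => none
  | l :: ls =>
    if PySem.Str.isIn (PySem.Str.strip pvTableHeader) l then some ([], l, ls)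
    else
      match pvGoBeforeB ls with
      | none => none
      | some (b, h, r) => some (l :: b, h, r)

-- the body of Source B's row branch (Source B's keep-filter, then the same insert)
def pvRowStepB (d : PySem.Dict String (List (String × String))) (line : String) :
    PySem.Dict String (List (String × String)) :=
  if PySem.Str.strip line ≠ "" && PySem.Str.startswith line "|" then
    pvInsertRow d (((PySem.Str.split? line "|").getD []).filter
        (fun p => PySem.Str.strip p ≠ "") |>.map PySem.Str.strip)
  else d

-- phase 1 of Source B's loop (after the separator row): parse rows until the end-of-table test
-- fires; the line that fired it and everything behind it are phase 2's 'after'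
def pvGoTableB : List String → PySem.Dict String (List (String × String)) →
    PySem.Dict String (List (String × String)) × List String
  | [], d => (d, [])
  | l :: ls, d =>
    if PySem.Str.startswith (PySem.Str.strip l) "|" = false then (d, l :: ls)
    else pvGoTableB ls (pvRowStepB d l)

def parse_existing_table_alt (content : String) :
    List String × (List (String × List (String × String))) × List String :=
  match pvGoBeforeB (PySem.Str.splitlines content) with
  | none => (PySem.Str.splitlines content,
      (PySem.Dict.empty : PySem.Dict String (List (String × String))).items, [])
  | some (before, h, rest) =>
    match rest with
    | [] => (before ++ [h], (PySem.Dict.empty : PySem.Dict String (List (String × String))).items, [])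
    | sep :: rest2 =>
      (before ++ [h, sep],
       (pvGoTableB rest2 PySem.Dict.empty).1.items,
       (pvGoTableB rest2 PySem.Dict.empty).2)

-- ===== PRECONDITION & SPEC =====
def Spec_parse_existing_table (content : String) (out : List String × (List (String × List (String × String))) × List String) : Prop := out = parse_existing_table_alt content
instance (content : String) (out : List String × (List (String × List (String × String))) × List String) : Decidable (Spec_parse_existing_table content out) := by unfold Spec_parse_existing_table; infer_instance

-- ===== CLAIM (what is proved, stated in full; the proofs are below) =====
def Claim_equal_parse_existing_table : Prop := ∀ (content : String), Dom_parse_existing_table content → Spec_parse_existing_table content (parse_existing_table content)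

-- ===== LEMMAS AND PROOFS =====

-- the two row-step bodies are the same function (A tests 'skip', B tests 'keep')
theorem pvRowStep_eq : pvRowStepA = pvRowStepB := by
  funext d line
  simp only [pvRowStepA, pvRowStepB]
  by_cases h1 : PySem.Str.strip line = "" <;>
    by_cases h2 : PySem.Chars.startswith line.toList ['|'] = true <;>
      simp [h1, h2]

-- number of leading lines whose stripped form starts with '|' (rows B consumes = rows A scans past)
def pvCntRows : List String → Nat
  | [] => 0
  | l :: t =>
    if PySem.Str.startswith (PySem.Str.strip l) "|" = false then 0 else pvCntRows t + 1

theorem pvGoBeforeB_none (ls : List String) (h : pvGoBeforeB ls = none) (i : Nat) :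
    pvFindStartA ls i = none := by
  induction ls generalizing i with
  | nil => rfl
  | cons l t ih =>
    simp only [pvGoBeforeB] at h
    simp only [pvFindStartA]
    split at h
    · exact absurd h (by simp)
    · rename_i hh
      rw [if_neg hh]
      cases hgt : pvGoBeforeB t with
      | none => exact ih hgt _
      | some v => rw [hgt] at h; rcases v with ⟨b, h', r⟩; simp at h

theorem pvGoBeforeB_some (ls : List String) (b : List String) (hd : String) (r : List String)
    (h : pvGoBeforeB ls = some (b, hd, r)) (i : Nat) :
    pvFindStartA ls i = some (i + b.length) ∧ ls = b ++ hd :: r := by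
  induction ls generalizing i b with
  | nil => simp [pvGoBeforeB] at h
  | cons l t ih =>
    simp only [pvGoBeforeB] at h
    split at h
    · rename_i hh
      obtain ⟨rfl, rfl, rfl⟩ : b = [] ∧ hd = l ∧ r = t := by
        simpa [eq_comm, and_comm] using h
      simp only [pvFindStartA]
      rw [if_pos hh]
      simp
    · rename_i hh
      cases hgt : pvGoBeforeB t with
      | none => rw [hgt] at h; simp at h
      | some v =>
        rcases v with ⟨b', h', r'⟩
        rw [hgt] at h
        simp only [Option.some.injEq, Prod.mk.injEq] at h
        obtain ⟨rfl, rfl, rfl⟩ : b = l :: b' ∧ hd = h' ∧ r = r' := by tauto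
        obtain ⟨ih1, ih2⟩ := ih b' hgt (i + 1)
        refine ⟨?_, by simp [ih2]⟩
        simp only [pvFindStartA]
        rw [if_neg hh, ih1]
        congr 1; simp; omega

theorem pvFindEndA_eq (lines : List String) (i : Nat) (hi : i ≤ lines.length) :
    pvFindEndA lines i = i + pvCntRows (lines.drop i) := by
  fun_induction pvFindEndA lines i with
  | case1 i h hTest =>
    rw [List.drop_eq_getElem_cons h]
    simp only [pvCntRows]
    rw [if_pos hTest]
    omega
  | case2 i h hTest ih =>
    rw [List.drop_eq_getElem_cons h]
    simp only [pvCntRows]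
    rw [if_neg hTest, ih (by omega)]
    omega
  | case3 i h =>
    have : i = lines.length := by omega
    subst this
    simp [pvCntRows]

theorem pvGoTableB_eq (ls : List String) (d : PySem.Dict String (List (String × String))) :
    pvGoTableB ls d =
      ((ls.take (pvCntRows ls)).foldl pvRowStepB d, ls.drop (pvCntRows ls)) := by
  induction ls generalizing d with
  | nil => rfl
  | cons l t ih =>
    simp only [pvGoTableB, pvCntRows]
    by_cases h : PySem.Str.startswith (PySem.Str.strip l) "|" = false
    · rw [if_pos h, if_pos h]
      simp
    · rw [if_neg h, if_neg h, ih]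
      simp

theorem pvTake2_cons (x y : String) (t : List String) (k : Nat) :
    (x :: y :: t).take (k + 2) = x :: y :: t.take k := rfl

-- ===== VERDICT (by name: the statement is the Claim_ definition above) =====
theorem parse_existing_table_spec : Claim_equal_parse_existing_table := by
  intro content _
  show parse_existing_table content = parse_existing_table_alt content
  unfold parse_existing_table parse_existing_table_alt pvParseA
  generalize PySem.Str.splitlines content = lines
  cases hgb : pvGoBeforeB lines with
  | none => rw [pvGoBeforeB_none lines hgb 0]
  | some v =>
    rcases v with ⟨b, h, r⟩
    obtain ⟨hfs, rfl⟩ := pvGoBeforeB_some _ b h r hgb 0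
    rw [Nat.zero_add] at hfs
    rw [hfs]
    cases r with
    | nil =>
      have hte : pvFindEndA (b ++ [h]) (b.length + 2) = b.length + 1 := by
        rw [pvFindEndA, dif_neg (by simp)]
        simp
      dsimp only
      rw [hte]
      unfold pvAssembleA
      rw [PySem.List.slice_to_natCast, List.take_left, PySem.List.slice_natCast,
        List.drop_left, Nat.add_sub_cancel_left, PySem.List.slice_from_natCast,
        List.drop_eq_nil_of_le (by simp)]
      simp [PySem.List.slice_to, PySem.List.slice_from]
    | cons sep rest2 =>
      have hdrop2 : (b ++ h :: sep :: rest2).drop (b.length + 2) = rest2 := by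
        rw [show b ++ h :: sep :: rest2 = (b ++ [h, sep]) ++ rest2 by simp,
          show b.length + 2 = (b ++ [h, sep]).length by simp, List.drop_left]
      have hte : pvFindEndA (b ++ h :: sep :: rest2) (b.length + 2)
          = b.length + (pvCntRows rest2 + 2) := by
        rw [pvFindEndA_eq _ _ (by simp), hdrop2]
        omega
      dsimp only
      rw [hte]
      set k := pvCntRows rest2 with hk
      have hafter : (b ++ h :: sep :: rest2).drop (b.length + (k + 2)) = rest2.drop k := by
        have h2 := congrArg (List.drop k) hdrop2
        rw [List.drop_drop] at h2
        rw [show b.length + (k + 2) = b.length + 2 + k by omega]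
        exact h2
      unfold pvAssembleA
      rw [PySem.List.slice_to_natCast, List.take_left, PySem.List.slice_natCast,
        List.drop_left, Nat.add_sub_cancel_left, pvTake2_cons,
        PySem.List.slice_from_natCast, hafter, pvGoTableB_eq, ← hk, pvRowStep_eq]
      simp [PySem.List.slice_to, PySem.List.slice_from, List.take_succ_cons]
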